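-- pv_equiv track=rewrite | github.com/nirajyt2022-source/edTech | backend/scripts/test_subject_topic_resolution.py | profile_subject
-- ===== SOURCE A (Python) =====
-- def profile_subject(profile):
--     tags = profile.get("allowed_skill_tags", [])
--     if any(t.startswith("eng_") for t in tags):   return "English"
--     if any(t.startswith("sci_") or t.startswith("evs_") for t in tags): return "Science/EVS"
--     if any(t.startswith("hin_") for t in tags):   return "Hindi"
--     if any(t.startswith("comp_") for t in tags):  return "Computer"
--     if any(t.startswith("gk_") for t in tags):    return "GK"
--     if any(t.startswith("moral_") for t in tags): return "Moral"
--     if any(t.startswith("health_") for t in tags):return "Health"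
--     return "Maths"
-- ===== SOURCE B (Python) =====
-- _RANKS = [("eng_", 0), ("sci_", 1), ("evs_", 1), ("hin_", 2), ("comp_", 3),
--           ("gk_", 4), ("moral_", 5), ("health_", 6)]
-- _NAMES = ["English", "Science/EVS", "Hindi", "Computer", "GK", "Moral", "Health", "Maths"]
--
-- def _rank(tag):
--     for prefix, r in _RANKS:
--         if tag.startswith(prefix):
--             return r
--     return 7
--
-- def profile_subject(profile):
--     tags = profile.get("allowed_skill_tags", [])
--     best = 7
--     for t in tags:
--         r = _rank(t)
--         if r < best:
--             best = r
--     return _NAMES[best]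
-- ===== Notes on version B (the rewrite author's own statement) =====
-- stated objective: alternative
-- what changed: Replaces seven separate any-scans over the tag list by a single pass that maintains the minimum priority rank via a prefix-to-rank table, then indexes a name table.
import Mathlib
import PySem

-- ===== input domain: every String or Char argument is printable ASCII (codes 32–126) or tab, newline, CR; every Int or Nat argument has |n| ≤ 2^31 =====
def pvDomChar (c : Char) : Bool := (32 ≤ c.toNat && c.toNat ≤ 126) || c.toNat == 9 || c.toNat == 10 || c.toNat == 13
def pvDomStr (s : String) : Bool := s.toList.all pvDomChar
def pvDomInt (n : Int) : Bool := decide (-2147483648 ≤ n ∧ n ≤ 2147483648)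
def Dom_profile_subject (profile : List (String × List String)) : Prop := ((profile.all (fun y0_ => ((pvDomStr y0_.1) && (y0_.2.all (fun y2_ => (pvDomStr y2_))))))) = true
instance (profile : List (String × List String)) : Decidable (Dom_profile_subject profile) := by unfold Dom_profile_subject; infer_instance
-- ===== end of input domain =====

set_option maxHeartbeats 1000000


-- B replaces A's seven separate any-scans by one pass keeping the minimum priority rank
-- (prefix→rank table, then a name-table lookup); objective: alternative decomposition, same cost class.

-- ===== PORT A =====
def profile_subject (profile : List (String × List String)) : String :=
  let tags := (PySem.Dict.ofList profile).getD "allowed_skill_tags" []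
  if tags.any (fun t => PySem.Str.startswith t "eng_") = true then "English"
  else if tags.any (fun t => PySem.Str.startswith t "sci_" || PySem.Str.startswith t "evs_") = true then "Science/EVS"
  else if tags.any (fun t => PySem.Str.startswith t "hin_") = true then "Hindi"
  else if tags.any (fun t => PySem.Str.startswith t "comp_") = true then "Computer"
  else if tags.any (fun t => PySem.Str.startswith t "gk_") = true then "GK"
  else if tags.any (fun t => PySem.Str.startswith t "moral_") = true then "Moral"
  else if tags.any (fun t => PySem.Str.startswith t "health_") = true then "Health"
  else "Maths"

-- ===== PORT B =====
def pvRanksB : List (String × Nat) :=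
  [("eng_", 0), ("sci_", 1), ("evs_", 1), ("hin_", 2), ("comp_", 3), ("gk_", 4), ("moral_", 5), ("health_", 6)]

def pvNamesB : List String :=
  ["English", "Science/EVS", "Hindi", "Computer", "GK", "Moral", "Health", "Maths"]

-- Source B's _rank: first matching prefix in the table, else 7
def pvRankB_aux : List (String × Nat) → String → Nat
  | [], _ => 7
  | (p, r) :: rest, tag => if PySem.Str.startswith tag p then r else pvRankB_aux rest tag

def pvRankB (tag : String) : Nat := pvRankB_aux pvRanksB tag

def profile_subject_alt (profile : List (String × List String)) : String :=
  let tags := (PySem.Dict.ofList profile).getD "allowed_skill_tags" []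
  let best := tags.foldl (fun b t => let r := pvRankB t; if r < b then r else b) 7
  -- Python indexes _NAMES[best]; best ≤ 7 < 8 always, so getD with a dummy default is exact
  pvNamesB.getD best "Maths"

-- ===== PRECONDITION & SPEC =====
def Spec_profile_subject (profile : List (String × List String)) (out : String) : Prop := out = profile_subject_alt profile
instance (profile : List (String × List String)) (out : String) : Decidable (Spec_profile_subject profile out) := by unfold Spec_profile_subject; infer_instance

-- ===== CLAIM (what is proved, stated in full; the proofs are below) =====
def Claim_equal_profile_subject : Prop := ∀ (profile : List (String × List String)), Dom_profile_subject profile → Spec_profile_subject profile (profile_subject profile)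

-- ===== LEMMAS AND PROOFS =====

-- the running minimum as a structural recursion
def pvMinRank : List String → Nat
  | [] => 7
  | t :: ts => min (pvRankB t) (pvMinRank ts)

theorem pvMinRank_le (ts : List String) : pvMinRank ts ≤ 7 := by
  induction ts with
  | nil => simp [pvMinRank]
  | cons t ts ih => simp [pvMinRank]; omega

theorem pvFoldl_eq_minRank (ts : List String) (b : Nat) (hb : b ≤ 7) :
    ts.foldl (fun b t => let r := pvRankB t; if r < b then r else b) b = min b (pvMinRank ts) := by
  induction ts generalizing b with
  | nil => simp [pvMinRank]; omega
  | cons t ts ih =>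
      have h1 : (let r := pvRankB t; if r < b then r else b) = min b (pvRankB t) := by
        simp only []; split <;> omega
      have hb' : min b (pvRankB t) ≤ 7 := by omega
      simp only [List.foldl_cons, h1, ih _ hb', pvMinRank]
      omega

theorem pvMinRank_le_iff (ts : List String) (k : Nat) (hk : k ≤ 6) :
    pvMinRank ts ≤ k ↔ ∃ t ∈ ts, pvRankB t ≤ k := by
  induction ts with
  | nil => simp [pvMinRank]; omega
  | cons t ts ih => simp [pvMinRank, ih]

-- pointwise characterisation of the rank thresholds by the prefixes A tests
theorem pvRank_le0 (t : String) : pvRankB t ≤ 0 ↔ PySem.Str.startswith t "eng_" = true := by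
  simp only [pvRankB, pvRanksB, pvRankB_aux]; split_ifs <;> simp_all
theorem pvRank_le1 (t : String) : pvRankB t ≤ 1 ↔
    (PySem.Str.startswith t "eng_" = true ∨ PySem.Str.startswith t "sci_" = true ∨ PySem.Str.startswith t "evs_" = true) := by
  simp only [pvRankB, pvRanksB, pvRankB_aux]; split_ifs <;> simp_all
theorem pvRank_le2 (t : String) : pvRankB t ≤ 2 ↔
    (PySem.Str.startswith t "eng_" = true ∨ PySem.Str.startswith t "sci_" = true ∨ PySem.Str.startswith t "evs_" = true ∨
     PySem.Str.startswith t "hin_" = true) := by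
  simp only [pvRankB, pvRanksB, pvRankB_aux]; split_ifs <;> simp_all
theorem pvRank_le3 (t : String) : pvRankB t ≤ 3 ↔
    (PySem.Str.startswith t "eng_" = true ∨ PySem.Str.startswith t "sci_" = true ∨ PySem.Str.startswith t "evs_" = true ∨
     PySem.Str.startswith t "hin_" = true ∨ PySem.Str.startswith t "comp_" = true) := by
  simp only [pvRankB, pvRanksB, pvRankB_aux]; split_ifs <;> simp_all
theorem pvRank_le4 (t : String) : pvRankB t ≤ 4 ↔
    (PySem.Str.startswith t "eng_" = true ∨ PySem.Str.startswith t "sci_" = true ∨ PySem.Str.startswith t "evs_" = true ∨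
     PySem.Str.startswith t "hin_" = true ∨ PySem.Str.startswith t "comp_" = true ∨ PySem.Str.startswith t "gk_" = true) := by
  simp only [pvRankB, pvRanksB, pvRankB_aux]; split_ifs <;> simp_all
theorem pvRank_le5 (t : String) : pvRankB t ≤ 5 ↔
    (PySem.Str.startswith t "eng_" = true ∨ PySem.Str.startswith t "sci_" = true ∨ PySem.Str.startswith t "evs_" = true ∨
     PySem.Str.startswith t "hin_" = true ∨ PySem.Str.startswith t "comp_" = true ∨ PySem.Str.startswith t "gk_" = true ∨
     PySem.Str.startswith t "moral_" = true) := by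
  simp only [pvRankB, pvRanksB, pvRankB_aux]; split_ifs <;> simp_all
theorem pvRank_le6 (t : String) : pvRankB t ≤ 6 ↔
    (PySem.Str.startswith t "eng_" = true ∨ PySem.Str.startswith t "sci_" = true ∨ PySem.Str.startswith t "evs_" = true ∨
     PySem.Str.startswith t "hin_" = true ∨ PySem.Str.startswith t "comp_" = true ∨ PySem.Str.startswith t "gk_" = true ∨
     PySem.Str.startswith t "moral_" = true ∨ PySem.Str.startswith t "health_" = true) := by
  simp only [pvRankB, pvRanksB, pvRankB_aux]; split_ifs <;> simp_all

-- ===== VERDICT (by name: the statement is the Claim_ definition above) =====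
theorem profile_subject_spec : Claim_equal_profile_subject := by
  intro profile _
  unfold Spec_profile_subject profile_subject profile_subject_alt
  set tags := (PySem.Dict.ofList profile).getD "allowed_skill_tags" [] with htags
  simp only []
  rw [pvFoldl_eq_minRank tags 7 (by omega), Nat.min_eq_right (pvMinRank_le tags)]
  have hle := pvMinRank_le tags
  have hany : ∀ k : Nat, k ≤ 6 →
      ((∃ t ∈ tags, pvRankB t ≤ k) ↔ pvMinRank tags ≤ k) := fun k hk => (pvMinRank_le_iff tags k hk).symm
  generalize hm : pvMinRank tags = m at *
  have pe : ∀ t, (fun t => PySem.Str.startswith t "eng_") t = true → pvRankB t ≤ 0 :=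
    fun t h => (pvRank_le0 t).mpr h
  have ps : ∀ t, (fun t => PySem.Str.startswith t "sci_" || PySem.Str.startswith t "evs_") t = true → pvRankB t ≤ 1 := by
    intro t h; rcases Bool.or_eq_true_iff.mp h with h | h <;> exact (pvRank_le1 t).mpr (by tauto)
  have ph : ∀ t, (fun t => PySem.Str.startswith t "hin_") t = true → pvRankB t ≤ 2 :=
    fun t h => (pvRank_le2 t).mpr (by tauto)
  have pc : ∀ t, (fun t => PySem.Str.startswith t "comp_") t = true → pvRankB t ≤ 3 :=
    fun t h => (pvRank_le3 t).mpr (by tauto)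
  have pg : ∀ t, (fun t => PySem.Str.startswith t "gk_") t = true → pvRankB t ≤ 4 :=
    fun t h => (pvRank_le4 t).mpr (by tauto)
  have pm : ∀ t, (fun t => PySem.Str.startswith t "moral_") t = true → pvRankB t ≤ 5 :=
    fun t h => (pvRank_le5 t).mpr (by tauto)
  have phe : ∀ t, (fun t => PySem.Str.startswith t "health_") t = true → pvRankB t ≤ 6 :=
    fun t h => (pvRank_le6 t).mpr (by tauto)
  have key : ∀ (p : String → Bool) (j : Nat), j < 7 → (∀ t, p t = true → pvRankB t ≤ j) → j < m →
      tags.any p = false := by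
    intro p j hj hpt hjm
    rw [List.any_eq_false]
    intro t ht hpt'
    have h1 : pvRankB t ≤ j := hpt t hpt'
    have h2 : m ≤ j := by rw [← hany j (by omega)]; exact ⟨t, ht, h1⟩
    omega
  interval_cases m
  case «0» =>
    have T : tags.any (fun t => PySem.Str.startswith t "eng_") = true := by
      obtain ⟨t, ht, hr⟩ := (hany 0 (by omega)).mpr (by omega)
      exact List.any_eq_true.mpr ⟨t, ht, (pvRank_le0 t).mp hr⟩
    simp only [T]
    simp [pvNamesB]
  case «1» =>
    have F0 : tags.any (fun t => PySem.Str.startswith t "eng_") = false := key _ 0 (by omega) pe (by omega)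
    have T : tags.any (fun t => PySem.Str.startswith t "sci_" || PySem.Str.startswith t "evs_") = true := by
      obtain ⟨t, ht, hr⟩ := (hany 1 (by omega)).mpr (by omega)
      have h0 : ¬ pvRankB t ≤ 0 := fun h => absurd ((hany 0 (by omega)).mp ⟨t, ht, h⟩) (by omega)
      rcases (pvRank_le1 t).mp hr with h|h|h
      · exact absurd ((pvRank_le0 t).mpr (by tauto)) (by omega)
      · exact List.any_eq_true.mpr ⟨t, ht, by first | exact h | (rw [h]; simp)⟩
      · exact List.any_eq_true.mpr ⟨t, ht, by first | exact h | (rw [h]; simp)⟩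
    simp only [F0, T]
    simp [pvNamesB]
  case «2» =>
    have F0 : tags.any (fun t => PySem.Str.startswith t "eng_") = false := key _ 0 (by omega) pe (by omega)
    have F1 : tags.any (fun t => PySem.Str.startswith t "sci_" || PySem.Str.startswith t "evs_") = false := key _ 1 (by omega) ps (by omega)
    have T : tags.any (fun t => PySem.Str.startswith t "hin_") = true := by
      obtain ⟨t, ht, hr⟩ := (hany 2 (by omega)).mpr (by omega)
      have h0 : ¬ pvRankB t ≤ 1 := fun h => absurd ((hany 1 (by omega)).mp ⟨t, ht, h⟩) (by omega)
      rcases (pvRank_le2 t).mp hr with h|h|h|h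
      · exact absurd ((pvRank_le0 t).mpr (by tauto)) (by omega)
      · exact absurd ((pvRank_le1 t).mpr (by tauto)) (by omega)
      · exact absurd ((pvRank_le1 t).mpr (by tauto)) (by omega)
      · exact List.any_eq_true.mpr ⟨t, ht, h⟩
    simp only [F0, F1, T]
    simp [pvNamesB]
  case «3» =>
    have F0 : tags.any (fun t => PySem.Str.startswith t "eng_") = false := key _ 0 (by omega) pe (by omega)
    have F1 : tags.any (fun t => PySem.Str.startswith t "sci_" || PySem.Str.startswith t "evs_") = false := key _ 1 (by omega) ps (by omega)
    have F2 : tags.any (fun t => PySem.Str.startswith t "hin_") = false := key _ 2 (by omega) ph (by omega)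
    have T : tags.any (fun t => PySem.Str.startswith t "comp_") = true := by
      obtain ⟨t, ht, hr⟩ := (hany 3 (by omega)).mpr (by omega)
      have h0 : ¬ pvRankB t ≤ 2 := fun h => absurd ((hany 2 (by omega)).mp ⟨t, ht, h⟩) (by omega)
      rcases (pvRank_le3 t).mp hr with h|h|h|h|h
      · exact absurd ((pvRank_le0 t).mpr (by tauto)) (by omega)
      · exact absurd ((pvRank_le1 t).mpr (by tauto)) (by omega)
      · exact absurd ((pvRank_le1 t).mpr (by tauto)) (by omega)
      · exact absurd ((pvRank_le2 t).mpr (by tauto)) (by omega)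
      · exact List.any_eq_true.mpr ⟨t, ht, h⟩
    simp only [F0, F1, F2, T]
    simp [pvNamesB]
  case «4» =>
    have F0 : tags.any (fun t => PySem.Str.startswith t "eng_") = false := key _ 0 (by omega) pe (by omega)
    have F1 : tags.any (fun t => PySem.Str.startswith t "sci_" || PySem.Str.startswith t "evs_") = false := key _ 1 (by omega) ps (by omega)
    have F2 : tags.any (fun t => PySem.Str.startswith t "hin_") = false := key _ 2 (by omega) ph (by omega)
    have F3 : tags.any (fun t => PySem.Str.startswith t "comp_") = false := key _ 3 (by omega) pc (by omega)
    have T : tags.any (fun t => PySem.Str.startswith t "gk_") = true := by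
      obtain ⟨t, ht, hr⟩ := (hany 4 (by omega)).mpr (by omega)
      have h0 : ¬ pvRankB t ≤ 3 := fun h => absurd ((hany 3 (by omega)).mp ⟨t, ht, h⟩) (by omega)
      rcases (pvRank_le4 t).mp hr with h|h|h|h|h|h
      · exact absurd ((pvRank_le0 t).mpr (by tauto)) (by omega)
      · exact absurd ((pvRank_le1 t).mpr (by tauto)) (by omega)
      · exact absurd ((pvRank_le1 t).mpr (by tauto)) (by omega)
      · exact absurd ((pvRank_le2 t).mpr (by tauto)) (by omega)
      · exact absurd ((pvRank_le3 t).mpr (by tauto)) (by omega)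
      · exact List.any_eq_true.mpr ⟨t, ht, h⟩
    simp only [F0, F1, F2, F3, T]
    simp [pvNamesB]
  case «5» =>
    have F0 : tags.any (fun t => PySem.Str.startswith t "eng_") = false := key _ 0 (by omega) pe (by omega)
    have F1 : tags.any (fun t => PySem.Str.startswith t "sci_" || PySem.Str.startswith t "evs_") = false := key _ 1 (by omega) ps (by omega)
    have F2 : tags.any (fun t => PySem.Str.startswith t "hin_") = false := key _ 2 (by omega) ph (by omega)
    have F3 : tags.any (fun t => PySem.Str.startswith t "comp_") = false := key _ 3 (by omega) pc (by omega)
    have F4 : tags.any (fun t => PySem.Str.startswith t "gk_") = false := key _ 4 (by omega) pg (by omega)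
    have T : tags.any (fun t => PySem.Str.startswith t "moral_") = true := by
      obtain ⟨t, ht, hr⟩ := (hany 5 (by omega)).mpr (by omega)
      have h0 : ¬ pvRankB t ≤ 4 := fun h => absurd ((hany 4 (by omega)).mp ⟨t, ht, h⟩) (by omega)
      rcases (pvRank_le5 t).mp hr with h|h|h|h|h|h|h
      · exact absurd ((pvRank_le0 t).mpr (by tauto)) (by omega)
      · exact absurd ((pvRank_le1 t).mpr (by tauto)) (by omega)
      · exact absurd ((pvRank_le1 t).mpr (by tauto)) (by omega)
      · exact absurd ((pvRank_le2 t).mpr (by tauto)) (by omega)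
      · exact absurd ((pvRank_le3 t).mpr (by tauto)) (by omega)
      · exact absurd ((pvRank_le4 t).mpr (by tauto)) (by omega)
      · exact List.any_eq_true.mpr ⟨t, ht, h⟩
    simp only [F0, F1, F2, F3, F4, T]
    simp [pvNamesB]
  case «6» =>
    have F0 : tags.any (fun t => PySem.Str.startswith t "eng_") = false := key _ 0 (by omega) pe (by omega)
    have F1 : tags.any (fun t => PySem.Str.startswith t "sci_" || PySem.Str.startswith t "evs_") = false := key _ 1 (by omega) ps (by omega)
    have F2 : tags.any (fun t => PySem.Str.startswith t "hin_") = false := key _ 2 (by omega) ph (by omega)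
    have F3 : tags.any (fun t => PySem.Str.startswith t "comp_") = false := key _ 3 (by omega) pc (by omega)
    have F4 : tags.any (fun t => PySem.Str.startswith t "gk_") = false := key _ 4 (by omega) pg (by omega)
    have F5 : tags.any (fun t => PySem.Str.startswith t "moral_") = false := key _ 5 (by omega) pm (by omega)
    have T : tags.any (fun t => PySem.Str.startswith t "health_") = true := by
      obtain ⟨t, ht, hr⟩ := (hany 6 (by omega)).mpr (by omega)
      have h0 : ¬ pvRankB t ≤ 5 := fun h => absurd ((hany 5 (by omega)).mp ⟨t, ht, h⟩) (by omega)
      rcases (pvRank_le6 t).mp hr with h|h|h|h|h|h|h|h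
      · exact absurd ((pvRank_le0 t).mpr (by tauto)) (by omega)
      · exact absurd ((pvRank_le1 t).mpr (by tauto)) (by omega)
      · exact absurd ((pvRank_le1 t).mpr (by tauto)) (by omega)
      · exact absurd ((pvRank_le2 t).mpr (by tauto)) (by omega)
      · exact absurd ((pvRank_le3 t).mpr (by tauto)) (by omega)
      · exact absurd ((pvRank_le4 t).mpr (by tauto)) (by omega)
      · exact absurd ((pvRank_le5 t).mpr (by tauto)) (by omega)
      · exact List.any_eq_true.mpr ⟨t, ht, h⟩
    simp only [F0, F1, F2, F3, F4, F5, T]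
    simp [pvNamesB]
  case «7» =>
    have F0 : tags.any (fun t => PySem.Str.startswith t "eng_") = false := key _ 0 (by omega) pe (by omega)
    have F1 : tags.any (fun t => PySem.Str.startswith t "sci_" || PySem.Str.startswith t "evs_") = false := key _ 1 (by omega) ps (by omega)
    have F2 : tags.any (fun t => PySem.Str.startswith t "hin_") = false := key _ 2 (by omega) ph (by omega)
    have F3 : tags.any (fun t => PySem.Str.startswith t "comp_") = false := key _ 3 (by omega) pc (by omega)
    have F4 : tags.any (fun t => PySem.Str.startswith t "gk_") = false := key _ 4 (by omega) pg (by omega)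
    have F5 : tags.any (fun t => PySem.Str.startswith t "moral_") = false := key _ 5 (by omega) pm (by omega)
    have F6 : tags.any (fun t => PySem.Str.startswith t "health_") = false := key _ 6 (by omega) phe (by omega)
    simp only [F0, F1, F2, F3, F4, F5, F6]
    simp [pvNamesB]
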